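-- pv_equiv track=rewrite | github.com/ChThorn/dynamic | planning/src/production_validator.py | _get_motion_planner_recommendations
-- ===== SOURCE A (Python) =====
-- from typing import Dict, List, Any, Optional, Tuple
--
-- def _get_motion_planner_recommendations(errors: List[str], warnings: List[str]) -> List[str]:
--     """Get recommendations for motion planner issues."""
--     recommendations = []
--
--     if any("IK" in warning for warning in warnings):
--         recommendations.append("Enable C-space analysis for better IK convergence")
--         recommendations.append("Review IK solver configuration and initial guess strategies")
--
--     if any("planning" in warning.lower() for warning in warnings):
--         recommendations.append("Check collision detection settings affecting motion planning")
--         recommendations.append("Consider enabling fallback planning strategies")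
--
--     if any("thread" in warning.lower() for warning in warnings):
--         recommendations.append("Verify thread safety implementation for production use")
--
--     return recommendations
-- ===== SOURCE B (Python) =====
-- from typing import List
--
-- # Rule table: (needle, fold_case, recommendations). Data-driven: the logic is one
-- # generic matcher plus a flatten, instead of per-topic code.
-- _RULES = [
--     ("IK", False, ["Enable C-space analysis for better IK convergence",
--                    "Review IK solver configuration and initial guess strategies"]),
--     ("planning", True, ["Check collision detection settings affecting motion planning",
--                         "Consider enabling fallback planning strategies"]),
--     ("thread", True, ["Verify thread safety implementation for production use"]),
-- ]
--
-- def _get_motion_planner_recommendations(errors: List[str], warnings: List[str]) -> List[str]: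
--     """Get recommendations for motion planner issues (rule-table version)."""
--     matched = set()
--     for w in warnings:
--         low = w.lower()
--         for needle, fold, _ in _RULES:
--             if needle in (low if fold else w):
--                 matched.add(needle)
--     return [rec for needle, _, recs in _RULES if needle in matched for rec in recs]
-- ===== Notes on version B (the rewrite author's own statement) =====
-- stated objective: alternative
-- what changed: Replaces A's hard-coded if/any chain with a data-driven rule table: one pass over warnings collects the set of matched rule keys (lowercasing each warning once), then the output is a flatten of the table filtered by that set; equal because the table preserves A's needles, per-needle case handling and IK->planning->thread order.
import Mathlib
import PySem

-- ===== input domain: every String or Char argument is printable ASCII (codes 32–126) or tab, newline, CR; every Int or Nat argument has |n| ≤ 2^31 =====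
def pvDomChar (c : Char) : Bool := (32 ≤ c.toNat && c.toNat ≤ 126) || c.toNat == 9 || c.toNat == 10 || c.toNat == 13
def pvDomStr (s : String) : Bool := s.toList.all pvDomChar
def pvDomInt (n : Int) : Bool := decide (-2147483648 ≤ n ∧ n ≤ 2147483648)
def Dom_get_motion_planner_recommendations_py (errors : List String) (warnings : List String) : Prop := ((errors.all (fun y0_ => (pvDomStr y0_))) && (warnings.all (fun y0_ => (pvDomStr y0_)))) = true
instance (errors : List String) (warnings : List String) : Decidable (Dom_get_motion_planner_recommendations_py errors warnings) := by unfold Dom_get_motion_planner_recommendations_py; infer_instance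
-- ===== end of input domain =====

-- B replaces A's hard-coded if/any chain with a data-driven rule table: one pass over
-- warnings collects the set of matched rule keys, then the output flattens the table
-- filtered by that set (alternative decomposition, same cost).

-- ===== PORT A =====
-- A: three independent any(...) scans, each appending its fixed strings.
def get_motion_planner_recommendations_py (errors : List String) (warnings : List String) : List String :=
  let recommendations : List String := []
  let recommendations :=
    if warnings.any (fun warning => PySem.Str.isIn "IK" warning) then
      recommendations ++ ["Enable C-space analysis for better IK convergence",
                          "Review IK solver configuration and initial guess strategies"]
    else recommendations
  let recommendations :=
    if warnings.any (fun warning => PySem.Str.isIn "planning" (PySem.Str.lower warning)) then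
      recommendations ++ ["Check collision detection settings affecting motion planning",
                          "Consider enabling fallback planning strategies"]
    else recommendations
  let recommendations :=
    if warnings.any (fun warning => PySem.Str.isIn "thread" (PySem.Str.lower warning)) then
      recommendations ++ ["Verify thread safety implementation for production use"]
    else recommendations
  recommendations

-- ===== PORT B =====
-- B: rule table (needle, fold_case, recs); one pass builds the set of matched needles,
-- then a flatten of the table filtered by membership in that set.
def pvRules : List (String × Bool × List String) :=
  [("IK", false, ["Enable C-space analysis for better IK convergence",
                  "Review IK solver configuration and initial guess strategies"]),
   ("planning", true, ["Check collision detection settings affecting motion planning",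
                       "Consider enabling fallback planning strategies"]),
   ("thread", true, ["Verify thread safety implementation for production use"])]

def pvMatchWarning (s : PySem.Set String) (w : String) : PySem.Set String :=
  let low := PySem.Str.lower w
  pvRules.foldl (fun s r =>
    if PySem.Str.isIn r.1 (if r.2.1 then low else w) then PySem.Set.add s r.1 else s) s

def get_motion_planner_recommendations_py_alt (errors : List String) (warnings : List String) : List String :=
  let matched := warnings.foldl pvMatchWarning PySem.Set.empty
  pvRules.flatMap (fun r => if PySem.Set.contains matched r.1 then r.2.2 else [])

-- ===== PRECONDITION & SPEC =====
def Spec_get_motion_planner_recommendations_py (errors : List String) (warnings : List String) (out : List String) : Prop := out = get_motion_planner_recommendations_py_alt errors warnings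
instance (errors : List String) (warnings : List String) (out : List String) : Decidable (Spec_get_motion_planner_recommendations_py errors warnings out) := by unfold Spec_get_motion_planner_recommendations_py; infer_instance

-- ===== CLAIM (what is proved, stated in full; the proofs are below) =====
def Claim_equal_get_motion_planner_recommendations_py : Prop := ∀ (errors : List String) (warnings : List String), Dom_get_motion_planner_recommendations_py errors warnings → Spec_get_motion_planner_recommendations_py errors warnings (get_motion_planner_recommendations_py errors warnings)

-- ===== LEMMAS AND PROOFS =====
-- Generic: membership of a needle in the matched set after the fold, given how one step treats it.
theorem mem_matched (ws : List String) (s : PySem.Set String) (n : String) (p : String → Bool)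
    (hstep : ∀ (s : PySem.Set String) (w : String), n ∈ pvMatchWarning s w ↔ n ∈ s ∨ p w = true) :
    n ∈ ws.foldl pvMatchWarning s ↔ n ∈ s ∨ ws.any p = true := by
  induction ws generalizing s with
  | nil => simp
  | cons w ws ih =>
    simp only [List.foldl_cons, List.any_cons, ih, hstep, Bool.or_eq_true]
    tauto

theorem step_ik (s : PySem.Set String) (w : String) :
    "IK" ∈ pvMatchWarning s w ↔ "IK" ∈ s ∨ PySem.Str.isIn "IK" w = true := by
  simp only [pvMatchWarning, pvRules, List.foldl_cons, List.foldl_nil]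
  split_ifs <;> simp_all [PySem.Set.mem_add]

theorem step_planning (s : PySem.Set String) (w : String) :
    "planning" ∈ pvMatchWarning s w ↔
      "planning" ∈ s ∨ PySem.Str.isIn "planning" (PySem.Str.lower w) = true := by
  simp only [pvMatchWarning, pvRules, List.foldl_cons, List.foldl_nil]
  split_ifs <;> simp_all [PySem.Set.mem_add]

theorem step_thread (s : PySem.Set String) (w : String) :
    "thread" ∈ pvMatchWarning s w ↔
      "thread" ∈ s ∨ PySem.Str.isIn "thread" (PySem.Str.lower w) = true := by
  simp only [pvMatchWarning, pvRules, List.foldl_cons, List.foldl_nil]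
  split_ifs <;> simp_all [PySem.Set.mem_add]

theorem contains_matched (ws : List String) (n : String) (p : String → Bool)
    (hstep : ∀ (s : PySem.Set String) (w : String), n ∈ pvMatchWarning s w ↔ n ∈ s ∨ p w = true) :
    PySem.Set.contains (ws.foldl pvMatchWarning PySem.Set.empty) n = ws.any p := by
  apply Bool.coe_iff_coe.mp
  rw [PySem.Set.contains_iff, mem_matched ws PySem.Set.empty n p hstep]
  simp [PySem.Set.empty]

-- ===== VERDICT (by name: the statement is the Claim_ definition above) =====
theorem get_motion_planner_recommendations_py_spec : Claim_equal_get_motion_planner_recommendations_py := by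
  intro errors warnings _
  show _ = _
  unfold get_motion_planner_recommendations_py get_motion_planner_recommendations_py_alt
  simp only [pvRules, List.flatMap_cons, List.flatMap_nil,
    contains_matched warnings "IK" _ step_ik,
    contains_matched warnings "planning" _ step_planning,
    contains_matched warnings "thread" _ step_thread]
  split_ifs <;> simp
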